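-- pv_equiv track=rewrite | github.com/JC-7991/PythonCourse | DailyCode/Week 18/task121.py | makePalin
-- ===== SOURCE A (Python) =====
-- def isPalin(string: str) -> bool:
--     return string == string[::-1]
--
-- def makePalin(string: str, k: int) -> bool:
--
--     if isPalin(string):
--         return True
--
--     if not k:
--         return False
--
--     for i in range(len(string)):
--         if makePalin(string[:i] + string[i + k :], k - 1):
--             return True
--
--     return False
-- ===== SOURCE B (Python) =====
-- def makePalin(string: str, k: int) -> bool:
--     cache = {}
--
--     def solve(s, k):
--         if s == s[::-1]:
--             return True
--         if k <= 0:
--             return False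
--         key = (s, k)
--         if key not in cache:
--             cache[key] = any(solve(s[:i] + s[i + k:], k - 1)
--                              for i in range(len(s)))
--         return cache[key]
--
--     return solve(string, k)
-- ===== Notes on version B (the rewrite author's own statement) =====
-- stated objective: alternative
-- what changed: B memoizes the recursion on (string, k) with a dict cache so each distinct (string, k) subproblem is solved once; Pre_ excludes negative k on non-palindromes, where A recurses forever or returns True via negative-slice wraparound and B returns False.
-- outside the precondition, e.g. on makePalin('ab', -1): A returns True, B returns False; on makePalin('ab', -2): A raises RecursionError, B returns False
import Mathlib
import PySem

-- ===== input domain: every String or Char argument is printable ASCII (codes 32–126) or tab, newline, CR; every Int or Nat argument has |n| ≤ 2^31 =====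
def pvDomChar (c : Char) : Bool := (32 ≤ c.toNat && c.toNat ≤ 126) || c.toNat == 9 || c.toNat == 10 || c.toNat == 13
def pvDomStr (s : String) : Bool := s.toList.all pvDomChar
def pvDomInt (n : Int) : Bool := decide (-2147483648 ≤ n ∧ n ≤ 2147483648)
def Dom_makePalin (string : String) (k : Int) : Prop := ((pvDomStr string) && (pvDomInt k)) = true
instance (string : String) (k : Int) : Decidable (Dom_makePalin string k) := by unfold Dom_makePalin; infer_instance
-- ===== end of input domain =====

-- B memoizes the recursion on (string, k) in a dict so each (string, k) subproblem is solved once.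

-- ===== PORT A =====
-- A's recursion: palindrome → True; k == 0 → False; else try every i, delete s[i:i+k], recurse with k-1.
-- The admitted inputs have 0 ≤ k (Pre_ below), so k is carried as a Nat and the slices
-- string[:i] / string[i+k:] have nonnegative bounds: List.take / List.drop are exact there.
def makePalinA (s : List Char) (k : Nat) : Bool :=
  if s = s.reverse then true                     -- isPalin(string)
  else
    match k with
    | 0 => false                                 -- if not k: return False
    | m + 1 =>                                   -- for i in range(len(string)): early-return ≡ any
      (List.range s.length).any fun i => makePalinA (s.take i ++ s.drop (i + (m + 1))) m

def makePalin (string : String) (k : Int) : Bool :=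
  makePalinA string.toList k.toNat

-- ===== PORT B =====
-- B's inner solve, with the mutated closure cache threaded through explicitly.
mutual
def solveB (s : List Char) (k : Nat) (cache : PySem.Dict (List Char × Nat) Bool) :
    Bool × PySem.Dict (List Char × Nat) Bool :=
  if s = s.reverse then (true, cache)            -- if s == s[::-1]: return True
  else
    match k with
    | 0 => (false, cache)                        -- if k <= 0: return False
    | m + 1 =>
      match cache.get? (s, m + 1) with           -- if key not in cache: …
      | some v => (v, cache)
      | none =>
        let r := anyB s m (List.range s.length) cache
        (r.1, r.2.insert (s, m + 1) r.1)         -- cache[key] = any(...)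
termination_by (k, 1, 0)

-- any(solve(s[:i] + s[i+k:], k - 1) for i in range(len(s))), short-circuiting, cache threaded
def anyB (s : List Char) (m : Nat) (is : List Nat) (cache : PySem.Dict (List Char × Nat) Bool) :
    Bool × PySem.Dict (List Char × Nat) Bool :=
  match is with
  | [] => (false, cache)
  | i :: rest =>
    let r := solveB (s.take i ++ s.drop (i + (m + 1))) m cache
    if r.1 then (true, r.2) else anyB s m rest r.2
termination_by (m + 1, 0, is.length)
end

def makePalin_alt (string : String) (k : Int) : Bool :=
  (solveB string.toList k.toNat PySem.Dict.empty).1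

-- ===== PRECONDITION & SPEC =====
-- Pre_ excludes negative k on non-palindromes: there A's 'not k' guard never fires, so A either
-- recurses forever (RecursionError) or returns True found through negative-slice wraparound in
-- s[i+k:] — an accident of the implementation a closed-form Pre_ cannot separate from the crashes;
-- B returns False there.
def Pre_makePalin (string : String) (k : Int) : Prop :=
  0 ≤ k ∨ string.toList = string.toList.reverse
instance (string : String) (k : Int) : Decidable (Pre_makePalin string k) := by
  unfold Pre_makePalin; infer_instance
def pvWitness_makePalin : String × Int := ("abca", 1)

def Spec_makePalin (string : String) (k : Int) (out : Bool) : Prop := out = makePalin_alt string k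
instance (string : String) (k : Int) (out : Bool) : Decidable (Spec_makePalin string k out) := by
  unfold Spec_makePalin; infer_instance

-- ===== CLAIM (what is proved, stated in full; the proofs are below) =====
def Claim_equal_makePalin : Prop := ∀ (string : String) (k : Int),
  Dom_makePalin string k → Pre_makePalin string k → Spec_makePalin string k (makePalin string k)

-- ===== LEMMAS AND PROOFS =====

lemma mpA_palin (s : List Char) (k : Nat) (h : s = s.reverse) : makePalinA s k = true := by
  rw [makePalinA.eq_def, if_pos h]

lemma mpA_zero (s : List Char) (h : ¬ s = s.reverse) : makePalinA s 0 = false := by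
  rw [makePalinA.eq_def, if_neg h]

lemma mpA_succ (s : List Char) (m : Nat) (h : ¬ s = s.reverse) :
    makePalinA s (m + 1) =
      ((List.range s.length).any fun i => makePalinA (s.take i ++ s.drop (i + (m + 1))) m) := by
  conv_lhs => rw [makePalinA.eq_def]
  rw [if_neg h]

-- the cache only ever holds values that agree with A's recursion
def CacheOK (c : PySem.Dict (List Char × Nat) Bool) : Prop :=
  ∀ s k v, c.get? (s, k) = some v → v = makePalinA s k

lemma cacheOK_empty : CacheOK PySem.Dict.empty := by
  intro s k v h
  simp [PySem.Dict.get?_empty] at h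

lemma solveB_correct : ∀ k s c, CacheOK c →
    (solveB s k c).1 = makePalinA s k ∧ CacheOK (solveB s k c).2 := by
  intro k
  induction k using Nat.strong_induction_on with
  | _ k IH =>
    have anyOK : ∀ m, m < k → ∀ s (is : List Nat) c, CacheOK c →
        (anyB s m is c).1 = (is.any fun i => makePalinA (s.take i ++ s.drop (i + (m + 1))) m) ∧
        CacheOK (anyB s m is c).2 := by
      intro m hm s is
      induction is with
      | nil => intro c hc; simpa [anyB] using hc
      | cons i rest ihrest =>
        intro c hc
        obtain ⟨hv, hc'⟩ := IH m hm (s.take i ++ s.drop (i + (m + 1))) c hc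
        unfold anyB
        by_cases hb : (solveB (s.take i ++ s.drop (i + (m + 1))) m c).1 = true
        · refine ⟨?_, by simpa [hb] using hc'⟩
          simp [hb, ← hv, List.any_cons]
        · simp only [Bool.not_eq_true] at hb
          obtain ⟨h1, h2⟩ := ihrest _ hc'
          refine ⟨?_, by simpa [hb] using h2⟩
          simp [hb, h1, List.any_cons, ← hv]
    intro s c hc
    by_cases hp : s = s.reverse
    · constructor
      · rw [mpA_palin s k hp]; rw [solveB.eq_def, if_pos hp]
      · rw [solveB.eq_def, if_pos hp]; exact hc
    · match k with
      | 0 =>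
        constructor
        · rw [mpA_zero s hp]; rw [solveB.eq_def, if_neg hp]
        · rw [solveB.eq_def, if_neg hp]; exact hc
      | m + 1 =>
        rw [mpA_succ s m hp]
        have hred : solveB s (m + 1) c =
            (match c.get? (s, m + 1) with
             | some v => (v, c)
             | none =>
               ((anyB s m (List.range s.length) c).1,
                (anyB s m (List.range s.length) c).2.insert (s, m + 1)
                  (anyB s m (List.range s.length) c).1)) := by
          rw [solveB.eq_def, if_neg hp]
        cases hget : PySem.Dict.get? c (s, m + 1) with
        | some v =>
          rw [hred]
          simp only [hget]
          refine ⟨?_, hc⟩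
          have := hc _ _ _ hget
          rw [mpA_succ s m hp] at this
          simpa using this
        | none =>
          rw [hred]
          simp only [hget]
          obtain ⟨h1, h2⟩ := anyOK m (Nat.lt_succ_self m) s (List.range s.length) c hc
          refine ⟨by simpa using h1, ?_⟩
          intro s' k' v' h'
          rcases eq_or_ne ((s', k') : List Char × Nat) (s, m + 1) with he | hne
          · rw [he, PySem.Dict.get?_insert_self, Option.some.injEq] at h'
            rw [Prod.mk.injEq] at he
            obtain ⟨rfl, rfl⟩ := he
            rw [← h', h1, mpA_succ _ _ hp]
          · rw [PySem.Dict.get?_insert_of_ne _ _ hne] at h'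
            exact h2 _ _ _ h'

-- ===== VERDICT (by name: the statement is the Claim_ definition above) =====
theorem makePalin_spec : Claim_equal_makePalin := by
  intro string k _ _
  unfold Spec_makePalin makePalin makePalin_alt
  exact ((solveB_correct k.toNat string.toList PySem.Dict.empty cacheOK_empty).1).symm
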